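-- pv_equiv track=rewrite | github.com/chaselover/practiceAlgorithm | 기타/codechallenge2.py | solution
-- ===== SOURCE A (Python) =====
-- def solution(grid):
--     d = ((1,0),(0,-1),(-1,0),(0,1))
--     results = []
--     rows = len(grid)
--     cols = len(grid[0])
--     visited = {(i,j,d): False for i in range(rows) for j in range(cols) for d in range(4)}
--     for i in range(rows):
--         for j in range(cols):
--             for di in range(4):
--                 if visited[(i,j,di)]:
--                     continue
--                 length = 1
--                 x, y, di = i, j, di
--                 while True:
--                     visited[(x,y,di)] = True
--                     nx = (x + d[di][0])%rows
--                     ny = (y + d[di][1])%cols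
--                     if grid[nx][ny] == 'S':
--                         nd = di
--                     elif grid[nx][ny] == 'L':
--                         nd = (di-1)%4
--                     else:
--                         nd = (di+1)%4
--                     if visited[(nx,ny,nd)]:
--                         results.append(length)
--                         break
--                     length += 1
--                     x,y,di = nx,ny,nd
--     results.sort()
--     return results
-- ===== SOURCE B (Python) =====
-- def solution(grid):
--     rows = len(grid)
--     cols = len(grid[0])
--
--     def nxt(x, y, di):
--         if di == 0:
--             x = (x + 1) % rows
--         elif di == 1:
--             y = (y - 1) % cols
--         elif di == 2:
--             x = (x - 1) % rows
--         else:
--             y = (y + 1) % cols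
--         c = grid[x][y]
--         if c == 'S':
--             nd = di
--         elif c == 'L':
--             nd = (di - 1) % 4
--         else:
--             nd = (di + 1) % 4
--         return x, y, nd
--
--     # The transition is a bijection on states (the move is invertible and the
--     # per-cell direction update is a rotation), so the state graph is a disjoint
--     # union of cycles.  No visited bookkeeping: walk from each state while the
--     # current state is lexicographically larger than the start, and emit the
--     # cycle length exactly once per cycle, at its lexicographically smallest
--     # state (only there does the walk come back around to the start itself).
--     results = []
--     for i in range(rows):
--         for j in range(cols):
--             for di in range(4):
--                 length = 1
--                 state = nxt(i, j, di)
--                 while state > (i, j, di):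
--                     length += 1
--                     state = nxt(*state)
--                 if state == (i, j, di):
--                     results.append(length)
--     results.sort()
--     return results
-- ===== Notes on version B (the rewrite author's own statement) =====
-- stated objective: alternative
-- what changed: B drops A's visited dictionary and chained walks entirely: since the beam transition is a bijection the state graph is a disjoint union of cycles, so B walks the cycle from each state with no bookkeeping (aborting as soon as the walk drops lexicographically below its start) and emits each cycle's length exactly once, at the cycle's lexicographically smallest state.
import Mathlib
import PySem

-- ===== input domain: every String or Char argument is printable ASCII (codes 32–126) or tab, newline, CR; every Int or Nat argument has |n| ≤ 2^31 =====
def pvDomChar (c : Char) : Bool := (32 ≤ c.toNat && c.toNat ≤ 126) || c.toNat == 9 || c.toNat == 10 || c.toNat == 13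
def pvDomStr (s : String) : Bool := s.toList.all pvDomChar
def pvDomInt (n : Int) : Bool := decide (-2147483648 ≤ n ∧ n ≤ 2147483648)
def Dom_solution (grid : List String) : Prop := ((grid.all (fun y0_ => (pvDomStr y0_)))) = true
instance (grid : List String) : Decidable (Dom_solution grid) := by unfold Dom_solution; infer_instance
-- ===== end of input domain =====

-- B is an alternative algorithm: the beam transition is a bijection, so the state graph is a
-- disjoint union of cycles; B keeps no visited structure and emits each cycle's length once,
-- at the cycle's lexicographically smallest state (equal return values; not claimed faster).

-- ===== PORT A =====
-- A's 'while True' beam walk; fuel = rows*cols*4+1 strictly exceeds the possible number of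
-- iterations of the Python loop (each iteration visits a previously unvisited state)
def solA_walk (grid : List String) (rows cols : Int) (fuel : Nat)
    (visited : PySem.Dict (Int × Int × Int) Bool) (results : List Int)
    (x y di length : Int) : PySem.Dict (Int × Int × Int) Bool × List Int :=
  match fuel with
  | 0 => (visited, results)
  | Nat.succ fuel =>
    let visited := visited.insert (x, y, di) true
    let dd := PySem.List.pyGetD [((1:Int),(0:Int)), (0,-1), (-1,0), (0,1)] di ((0:Int),(0:Int))
    let nx := PySem.Int.mod (x + dd.1) rows
    let ny := PySem.Int.mod (y + dd.2) cols
    let c := PySem.List.pyGetD (PySem.List.pyGetD grid nx "").toList ny ' '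
    let nd := if c = 'S' then di
              else if c = 'L' then PySem.Int.mod (di - 1) 4
              else PySem.Int.mod (di + 1) 4
    if visited.getD (nx, ny, nd) false then (visited, results ++ [length])
    else solA_walk grid rows cols fuel visited results nx ny nd (length + 1)

def solution (grid : List String) : List Int :=
  let rows : Int := PySem.List.len grid
  let cols : Int := PySem.Str.len (PySem.List.pyGetD grid 0 "")
  let visited : PySem.Dict (Int × Int × Int) Bool :=
    ((PySem.List.pyRange 0 rows).flatMap (fun i =>
      (PySem.List.pyRange 0 cols).flatMap (fun j =>
        (PySem.List.pyRange 0 4).map (fun di => (i, j, di))))).foldl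
      (fun d k => d.insert k false) PySem.Dict.empty
  let st := (PySem.List.pyRange 0 rows).foldl (fun st i =>
      (PySem.List.pyRange 0 cols).foldl (fun st j =>
        (PySem.List.pyRange 0 4).foldl (fun st di =>
          if st.1.getD (i, j, di) false then st
          else solA_walk grid rows cols ((rows * cols * 4).toNat + 1) st.1 st.2 i j di 1) st) st)
    (visited, ([] : List Int))
  PySem.List.sorted st.2 (fun x => x) false

-- ===== PORT B =====
-- Python's tuple '<' on int triples (lexicographic)
def pvLexLt (t u : Int × Int × Int) : Bool :=
  decide (t.1 < u.1) ||
    (decide (t.1 = u.1) &&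
      (decide (t.2.1 < u.2.1) || (decide (t.2.1 = u.2.1) && decide (t.2.2 < u.2.2))))

-- B's helper nxt(x, y, di): move, then rotate by the character of the target cell
def solBnext (grid : List String) (rows cols : Int) (x y di : Int) : Int × Int × Int :=
  let p := if di = 0 then (PySem.Int.mod (x + 1) rows, y)
           else if di = 1 then (x, PySem.Int.mod (y - 1) cols)
           else if di = 2 then (PySem.Int.mod (x - 1) rows, y)
           else (x, PySem.Int.mod (y + 1) cols)
  let c := PySem.List.pyGetD (PySem.List.pyGetD grid p.1 "").toList p.2 ' '
  let nd := if c = 'S' then di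
            else if c = 'L' then PySem.Int.mod (di - 1) 4
            else PySem.Int.mod (di + 1) 4
  (p.1, p.2, nd)

-- B's 'while state > (i, j, di)' cycle walk (fuel strictly exceeds any cycle length)
def solB_walk (grid : List String) (rows cols : Int) (start : Int × Int × Int) (fuel : Nat)
    (state : Int × Int × Int) (length : Int) : (Int × Int × Int) × Int :=
  match fuel with
  | 0 => (state, length)
  | Nat.succ fuel =>
    if pvLexLt start state then
      solB_walk grid rows cols start fuel
        (solBnext grid rows cols state.1 state.2.1 state.2.2) (length + 1)
    else (state, length)

def solution_alt (grid : List String) : List Int :=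
  let rows : Int := PySem.List.len grid
  let cols : Int := PySem.Str.len (PySem.List.pyGetD grid 0 "")
  let res := (PySem.List.pyRange 0 rows).foldl (fun res i =>
      (PySem.List.pyRange 0 cols).foldl (fun res j =>
        (PySem.List.pyRange 0 4).foldl (fun res di =>
          let p := solB_walk grid rows cols (i, j, di) ((rows * cols * 4).toNat + 1)
                     (solBnext grid rows cols i j di) 1
          if p.1 = (i, j, di) then res ++ [p.2] else res) res) res) []
  PySem.List.sorted res (fun x => x) false

-- ===== PRECONDITION & SPEC =====
-- Pre_ excludes exactly the inputs where Python A raises IndexError: the empty grid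
-- (grid[0]) and grids containing a row shorter than the first row (grid[nx][ny]).
def Pre_solution (grid : List String) : Prop :=
  grid ≠ [] ∧ ∀ s ∈ grid, (grid.headI).toList.length ≤ s.toList.length
instance (grid : List String) : Decidable (Pre_solution grid) := by
  unfold Pre_solution; infer_instance

def pvWitness_solution : List String := ["S"]

def Spec_solution (grid : List String) (out : List Int) : Prop := out = solution_alt grid
instance (grid : List String) (out : List Int) : Decidable (Spec_solution grid out) := by
  unfold Spec_solution; infer_instance

-- ===== CLAIM (what is proved, stated in full; the proofs are below) =====
def Claim_equal_solution : Prop :=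
  ∀ (grid : List String), Dom_solution grid → Pre_solution grid → Spec_solution grid (solution grid)

-- ===== LEMMAS AND PROOFS =====

-- the beam step function A computes inline, and validity of a state
def pvStepA (grid : List String) (rows cols : Int) (t : Int × Int × Int) : Int × Int × Int :=
  let dd := PySem.List.pyGetD [((1:Int),(0:Int)), (0,-1), (-1,0), (0,1)] t.2.2 ((0:Int),(0:Int))
  let nx := PySem.Int.mod (t.1 + dd.1) rows
  let ny := PySem.Int.mod (t.2.1 + dd.2) cols
  let c := PySem.List.pyGetD (PySem.List.pyGetD grid nx "").toList ny ' '
  let nd := if c = 'S' then t.2.2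
            else if c = 'L' then PySem.Int.mod (t.2.2 - 1) 4
            else PySem.Int.mod (t.2.2 + 1) 4
  (nx, ny, nd)

def pvValid (rows cols : Int) (t : Int × Int × Int) : Prop :=
  0 ≤ t.1 ∧ t.1 < rows ∧ 0 ≤ t.2.1 ∧ t.2.1 < cols ∧ 0 ≤ t.2.2 ∧ t.2.2 < 4

def pvIter (grid : List String) (rows cols : Int) (k : Nat) (t : Int × Int × Int) :
    Int × Int × Int := (pvStepA grid rows cols)^[k] t

theorem pvLexLt_iff (t u : Int × Int × Int) :
    pvLexLt t u = true ↔
      (t.1 < u.1 ∨ (t.1 = u.1 ∧ (t.2.1 < u.2.1 ∨ (t.2.1 = u.2.1 ∧ t.2.2 < u.2.2)))) := by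
  simp [pvLexLt]

theorem pvLexLt_irrefl (t : Int × Int × Int) : pvLexLt t t = false := by
  rw [← Bool.not_eq_true, pvLexLt_iff]
  omega

theorem pvLexLt_total (t u : Int × Int × Int) (h : t ≠ u) :
    pvLexLt t u = true ∨ pvLexLt u t = true := by
  obtain ⟨a, b, c⟩ := t; obtain ⟨a', b', c'⟩ := u
  rw [pvLexLt_iff, pvLexLt_iff]
  have h' : ¬ (a = a' ∧ b = b' ∧ c = c') := by
    intro ⟨x1, x2, x3⟩; exact h (by rw [x1, x2, x3])
  dsimp only
  omega

theorem pvLexLt_asymm (t u : Int × Int × Int) (h : pvLexLt t u = true) :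
    pvLexLt u t = false := by
  obtain ⟨a, b, c⟩ := t; obtain ⟨a', b', c'⟩ := u
  rw [pvLexLt_iff] at h
  rw [← Bool.not_eq_true, pvLexLt_iff]
  simp only at h ⊢
  omega

theorem pvStepA_valid (grid : List String) (rows cols : Int) (hR : 0 < rows) (hC : 0 < cols)
    (t : Int × Int × Int) (ht : pvValid rows cols t) :
    pvValid rows cols (pvStepA grid rows cols t) := by
  obtain ⟨x, y, d⟩ := t
  simp only [pvStepA, pvValid]
  refine ⟨PySem.Int.mod_nonneg _ hR, PySem.Int.mod_lt _ hR,
    PySem.Int.mod_nonneg _ hC, PySem.Int.mod_lt _ hC, ?_, ?_⟩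
  · split_ifs
    · exact ht.2.2.2.2.1
    · exact PySem.Int.mod_nonneg _ (by omega)
    · exact PySem.Int.mod_nonneg _ (by omega)
  · split_ifs
    · exact ht.2.2.2.2.2
    · exact PySem.Int.mod_lt _ (by omega)
    · exact PySem.Int.mod_lt _ (by omega)

theorem pvIter_valid (grid : List String) (rows cols : Int) (hR : 0 < rows) (hC : 0 < cols)
    (k : Nat) (t : Int × Int × Int) (ht : pvValid rows cols t) :
    pvValid rows cols (pvIter grid rows cols k t) := by
  induction k with
  | zero => exact ht
  | succ k ih =>
    rw [pvIter, Function.iterate_succ_apply']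
    exact pvStepA_valid grid rows cols hR hC _ ih

-- B's nxt agrees with A's inline step on valid states
theorem pvStepB_eq (grid : List String) (rows cols : Int) (hR : 0 < rows) (hC : 0 < cols)
    (t : Int × Int × Int) (ht : pvValid rows cols t) :
    solBnext grid rows cols t.1 t.2.1 t.2.2 = pvStepA grid rows cols t := by
  obtain ⟨x, y, d⟩ := t
  obtain ⟨h1, h2, h3, h4, h5, h6⟩ := ht
  dsimp only at h1 h2 h3 h4 h5 h6
  have hd : d = 0 ∨ d = 1 ∨ d = 2 ∨ d = 3 := by omega
  have hx : PySem.Int.mod x rows = x := by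
    rw [PySem.Int.mod_eq_emod_of_pos hR]; exact Int.emod_eq_of_lt h1 h2
  have hy : PySem.Int.mod y cols = y := by
    rw [PySem.Int.mod_eq_emod_of_pos hC]; exact Int.emod_eq_of_lt h3 h4
  rcases hd with h | h | h | h <;> subst h <;>
    simp [solBnext, pvStepA, PySem.List.pyGetD, hx, hy, sub_eq_add_neg,
      (by decide : Int.toNat 2 = 2), (by decide : Int.toNat 3 = 3)]

-- the beam step is injective on valid states
theorem pvModCancel (r a b e : Int) (hr : 0 < r) (ha : 0 ≤ a) (ha2 : a < r)
    (hb : 0 ≤ b) (hb2 : b < r) (h : (a + e) % r = (b + e) % r) : a = b := by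
  have h3 : (a + e - (b + e)) % r = 0 := Int.emod_eq_emod_iff_emod_sub_eq_zero.mp h
  rw [show a + e - (b + e) = a - b by ring] at h3
  obtain ⟨k, hk⟩ := Int.dvd_of_emod_eq_zero h3
  have hk1 : k < 1 := by nlinarith
  have hk2 : -1 < k := by nlinarith
  have hk0 : k = 0 := by omega
  rw [hk0, mul_zero] at hk
  omega

theorem pvStepA_inj (grid : List String) (rows cols : Int) (hR : 0 < rows) (hC : 0 < cols)
    (t u : Int × Int × Int) (ht : pvValid rows cols t) (hu : pvValid rows cols u)
    (h : pvStepA grid rows cols t = pvStepA grid rows cols u) : t = u := by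
  obtain ⟨x, y, d⟩ := t; obtain ⟨x', y', d'⟩ := u
  obtain ⟨t1, t2, t3, t4, t5, t6⟩ := ht
  obtain ⟨u1, u2, u3, u4, u5, u6⟩ := hu
  dsimp only at t1 t2 t3 t4 t5 t6 u1 u2 u3 u4 u5 u6
  simp only [pvStepA] at h
  rw [Prod.mk.injEq, Prod.mk.injEq] at h
  obtain ⟨hA, hB, hT⟩ := h
  rw [hA, hB] at hT
  have h40 : (0:Int) < 4 := by norm_num
  -- the rotation applied on both sides uses the same cell character, so d = d'
  have hdq : d = d' := by
    split_ifs at hT with hS hL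
    · exact hT
    · rw [PySem.Int.mod_eq_emod_of_pos h40, PySem.Int.mod_eq_emod_of_pos h40] at hT
      omega
    · rw [PySem.Int.mod_eq_emod_of_pos h40, PySem.Int.mod_eq_emod_of_pos h40] at hT
      omega
  subst hdq
  have hd : d = 0 ∨ d = 1 ∨ d = 2 ∨ d = 3 := by omega
  simp only [Prod.mk.injEq]
  rcases hd with rfl|rfl|rfl|rfl <;>
    simp only [PySem.List.pyGetD, PySem.Int.mod_eq_emod_of_pos hR,
      PySem.Int.mod_eq_emod_of_pos hC] at hA hB <;>
    norm_num at hA hB ⊢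
  · exact ⟨pvModCancel rows x x' 1 hR t1 t2 u1 u2 (by simpa using hA),
      pvModCancel cols y y' 0 hC t3 t4 u3 u4 (by simpa using hB)⟩
  · exact ⟨pvModCancel rows x x' 0 hR t1 t2 u1 u2 (by simpa using hA),
      pvModCancel cols y y' (-1) hC t3 t4 u3 u4 (by simpa using hB)⟩
  · exact ⟨pvModCancel rows x x' (-1) hR t1 t2 u1 u2 (by simpa using hA),
      pvModCancel cols y y' 0 hC t3 t4 u3 u4 (by simpa using hB)⟩
  · exact ⟨pvModCancel rows x x' 0 hR t1 t2 u1 u2 (by simpa using hA),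
      pvModCancel cols y y' 1 hC t3 t4 u3 u4 (by simpa using hB)⟩

theorem pvCancel (grid : List String) (rows cols : Int) (hR : 0 < rows) (hC : 0 < cols)
    (s : Int × Int × Int) (hs : pvValid rows cols s) :
    ∀ (a d : Nat), pvIter grid rows cols a s = pvIter grid rows cols (a + d) s →
      pvIter grid rows cols d s = s := by
  intro a
  induction a with
  | zero =>
    intro d h
    simp only [pvIter, Function.iterate_zero_apply, Nat.zero_add] at h
    exact h.symm
  | succ a ih =>
    intro d h
    apply ih
    rw [show a + 1 + d = (a + d) + 1 by omega] at h
    simp only [pvIter, Function.iterate_succ_apply'] at h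
    exact pvStepA_inj grid rows cols hR hC _ _
      (pvIter_valid grid rows cols hR hC a s hs) (pvIter_valid grid rows cols hR hC (a + d) s hs) h

theorem pvPeriod_exists (grid : List String) (rows cols : Int) (hR : 0 < rows) (hC : 0 < cols)
    (s : Int × Int × Int) (hs : pvValid rows cols s) :
    ∃ L : Nat, 0 < L ∧ L ≤ (rows * cols * 4).toNat ∧ pvIter grid rows cols L s = s ∧
      ∀ i, 0 < i → i < L → pvIter grid rows cols i s ≠ s := by
  have hmem : ∀ t : Int × Int × Int,
      t ∈ (Finset.Ico (0:Int) rows ×ˢ (Finset.Ico (0:Int) cols ×ˢ Finset.Ico (0:Int) 4)) ↔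
        pvValid rows cols t := by
    intro t
    simp only [Finset.mem_product, Finset.mem_Ico, pvValid]
    tauto
  have hcard : (Finset.Ico (0:Int) rows ×ˢ (Finset.Ico (0:Int) cols ×ˢ Finset.Ico (0:Int) 4)).card
      = (rows * cols * 4).toNat := by
    have hcast : rows * cols * 4 = ((rows.toNat * (cols.toNat * 4) : Nat) : Int) := by
      push_cast
      rw [Int.toNat_of_nonneg (le_of_lt hR), Int.toNat_of_nonneg (le_of_lt hC)]
      ring
    rw [Finset.card_product, Finset.card_product, Int.card_Ico, Int.card_Ico, Int.card_Ico,
      hcast, Int.toNat_natCast]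
    norm_num
    exact Or.inl (Or.inl (by decide))
  obtain ⟨a, ha, b, hb, hne, heq⟩ :=
    Finset.exists_ne_map_eq_of_card_lt_of_maps_to
      (s := Finset.range ((rows * cols * 4).toNat + 1))
      (t := Finset.Ico (0:Int) rows ×ˢ (Finset.Ico (0:Int) cols ×ˢ Finset.Ico (0:Int) 4))
      (f := fun k => pvIter grid rows cols k s)
      (by rw [Finset.card_range, hcard]; omega)
      (fun k _ => (hmem _).mpr (pvIter_valid grid rows cols hR hC k s hs))
  rw [Finset.mem_range] at ha hb
  have hm : ∃ m, 0 < m ∧ m ≤ (rows * cols * 4).toNat ∧ pvIter grid rows cols m s = s := by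
    rcases Nat.lt_or_ge a b with hab | hab
    · exact ⟨b - a, by omega, by omega,
        pvCancel grid rows cols hR hC s hs a (b - a)
          (by rw [show a + (b - a) = b by omega]; exact heq)⟩
    · have hba : b < a := by omega
      exact ⟨a - b, by omega, by omega,
        pvCancel grid rows cols hR hC s hs b (a - b)
          (by rw [show b + (a - b) = a by omega]; exact heq.symm)⟩
  obtain ⟨m, hm0, hmN, hms⟩ := hm
  letI : DecidablePred (fun k : Nat => 0 < k ∧ pvIter grid rows cols k s = s) :=
    fun k => Classical.dec _
  have hex : ∃ k : Nat, 0 < k ∧ pvIter grid rows cols k s = s := ⟨m, hm0, hms⟩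
  refine ⟨Nat.find hex, (Nat.find_spec hex).1,
    le_trans (Nat.find_min' hex ⟨hm0, hms⟩) hmN, (Nat.find_spec hex).2, ?_⟩
  intro i hi0 hiL hieq
  exact Nat.find_min hex hiL ⟨hi0, hieq⟩

theorem pvDistinct (grid : List String) (rows cols : Int) (hR : 0 < rows) (hC : 0 < cols)
    (s : Int × Int × Int) (hs : pvValid rows cols s) (L : Nat)
    (hmin : ∀ i, 0 < i → i < L → pvIter grid rows cols i s ≠ s)
    (i j : Nat) (hi : i < j) (hj : j < L) :
    pvIter grid rows cols i s ≠ pvIter grid rows cols j s := by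
  intro h
  refine hmin (j - i) (by omega) (by omega) ?_
  exact pvCancel grid rows cols hR hC s hs i (j - i)
    (by rw [show i + (j - i) = j by omega]; exact h)

theorem pvIter_mod (grid : List String) (rows cols : Int)
    (s : Int × Int × Int) (L : Nat) (_hL : 0 < L) (hLs : pvIter grid rows cols L s = s)
    (i : Nat) : pvIter grid rows cols i s = pvIter grid rows cols (i % L) s := by
  have aux : ∀ q r : Nat, pvIter grid rows cols (L * q + r) s = pvIter grid rows cols r s := by
    intro q
    induction q with
    | zero => intro r; simp
    | succ q ih =>
      intro r
      rw [show L * (q + 1) + r = (L * q + r) + L by ring, pvIter, Function.iterate_add_apply]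
      rw [show (pvStepA grid rows cols)^[L] s = pvIter grid rows cols L s from rfl, hLs]
      exact ih r
  conv_lhs => rw [← Nat.div_add_mod i L]
  exact aux (i / L) (i % L)

theorem pvOrbit_symm (grid : List String) (rows cols : Int) (hR : 0 < rows) (hC : 0 < cols)
    (p t : Int × Int × Int) (hp : pvValid rows cols p)
    (i : Nat) (h : t = pvIter grid rows cols i p) :
    ∃ j : Nat, p = pvIter grid rows cols j t := by
  obtain ⟨L, hL0, hLN, hLs, hmin⟩ := pvPeriod_exists grid rows cols hR hC p hp
  have h' : t = pvIter grid rows cols (i % L) p := by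
    rw [h, pvIter_mod grid rows cols p L hL0 hLs i]
  have hlt : i % L < L := Nat.mod_lt _ hL0
  by_cases h0 : i % L = 0
  · exact ⟨0, by rw [h', h0]; rfl⟩
  · refine ⟨L - i % L, ?_⟩
    rw [h']
    have h2 : pvIter grid rows cols ((L - i % L) + i % L) p
        = pvIter grid rows cols (L - i % L) (pvIter grid rows cols (i % L) p) := by
      rw [pvIter, Function.iterate_add_apply]
      rfl
    rw [← h2, show (L - i % L) + i % L = L by omega, hLs]

-- unfolding lemma for A's walk, with the step recognized as pvStepA
theorem solA_walk_succ (grid : List String) (rows cols : Int) (fuel : Nat)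
    (visited : PySem.Dict (Int × Int × Int) Bool) (results : List Int) (x y di length : Int) :
    solA_walk grid rows cols (fuel + 1) visited results x y di length =
      (if (visited.insert (x, y, di) true).getD (pvStepA grid rows cols (x, y, di)) false then
        (visited.insert (x, y, di) true, results ++ [length])
      else solA_walk grid rows cols fuel (visited.insert (x, y, di) true) results
        (pvStepA grid rows cols (x, y, di)).1 (pvStepA grid rows cols (x, y, di)).2.1
        (pvStepA grid rows cols (x, y, di)).2.2 (length + 1)) := rfl

-- unfolding lemma for B's walk
theorem solB_walk_succ (grid : List String) (rows cols : Int) (start : Int × Int × Int)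
    (fuel : Nat) (state : Int × Int × Int) (length : Int) :
    solB_walk grid rows cols start (fuel + 1) state length =
      (if pvLexLt start state then
        solB_walk grid rows cols start fuel
          (solBnext grid rows cols state.1 state.2.1 state.2.2) (length + 1)
      else (state, length)) := rfl

-- A's inner walk: starting the walk at iterate k of an unvisited-orbit start appends the
-- cycle length L and marks exactly the orbit
theorem pvA_walk (grid : List String) (rows cols : Int) (hR : 0 < rows) (hC : 0 < cols)
    (s : Int × Int × Int) (hs : pvValid rows cols s) (L : Nat) (_hL0 : 0 < L)
    (hLs : pvIter grid rows cols L s = s)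
    (hmin : ∀ i, 0 < i → i < L → pvIter grid rows cols i s ≠ s)
    (M : (Int × Int × Int) → Prop) (hM : ∀ i, ¬ M (pvIter grid rows cols i s)) :
    ∀ (fuel k : Nat) (W : PySem.Dict (Int × Int × Int) Bool) (res : List Int),
      k < L → L ≤ k + fuel →
      (∀ t, W.getD t false = true ↔ (M t ∨ ∃ j, j < k ∧ t = pvIter grid rows cols j s)) →
      ∃ W', solA_walk grid rows cols fuel W res (pvIter grid rows cols k s).1
          (pvIter grid rows cols k s).2.1 (pvIter grid rows cols k s).2.2 ((k : Int) + 1) =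
          (W', res ++ [(L : Int)]) ∧
        ∀ t, W'.getD t false = true ↔ (M t ∨ ∃ j, j < L ∧ t = pvIter grid rows cols j s) := by
  intro fuel
  induction fuel with
  | zero => intro k W res hk hfuel _; omega
  | succ fuel ih =>
    intro k W res hk hfuel hW
    have hW1 : ∀ t, (W.insert ((pvIter grid rows cols k s).1, (pvIter grid rows cols k s).2.1,
        (pvIter grid rows cols k s).2.2) true).getD t false = true ↔
        (M t ∨ ∃ j, j < k + 1 ∧ t = pvIter grid rows cols j s) := by
      intro t
      rw [PySem.Dict.getD_insert]
      by_cases he : t = ((pvIter grid rows cols k s).1, (pvIter grid rows cols k s).2.1,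
          (pvIter grid rows cols k s).2.2)
      · rw [if_pos he]
        exact iff_of_true rfl (Or.inr ⟨k, by omega, he⟩)
      · rw [if_neg he, hW t]
        constructor
        · rintro (hM' | ⟨j, hj, rfl⟩)
          · exact Or.inl hM'
          · exact Or.inr ⟨j, by omega, rfl⟩
        · rintro (hM' | ⟨j, hj, rfl⟩)
          · exact Or.inl hM'
          · rcases Nat.lt_or_ge j k with hjk | hjk
            · exact Or.inr ⟨j, hjk, rfl⟩
            · exact absurd (show j = k by omega) (fun hjj => he (by rw [hjj]))
    have hstep : pvStepA grid rows cols ((pvIter grid rows cols k s).1,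
        (pvIter grid rows cols k s).2.1, (pvIter grid rows cols k s).2.2)
        = pvIter grid rows cols (k + 1) s := by
      exact (Function.iterate_succ_apply' (pvStepA grid rows cols) k s).symm
    rw [solA_walk_succ, hstep]
    by_cases hLk : k + 1 = L
    · have hcond : (W.insert ((pvIter grid rows cols k s).1, (pvIter grid rows cols k s).2.1,
          (pvIter grid rows cols k s).2.2) true).getD (pvIter grid rows cols (k + 1) s) false
          = true := by
        rw [hW1]
        exact Or.inr ⟨0, by omega, by rw [hLk, hLs]; rfl⟩
      rw [if_pos hcond, show (k : Int) + 1 = (L : Int) by omega]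
      refine ⟨_, rfl, ?_⟩
      intro t
      rw [hW1 t, hLk]
    · have hcond : ¬ ((W.insert ((pvIter grid rows cols k s).1, (pvIter grid rows cols k s).2.1,
          (pvIter grid rows cols k s).2.2) true).getD (pvIter grid rows cols (k + 1) s) false
          = true) := by
        rw [hW1]
        rintro (hM' | ⟨j, hj, hje⟩)
        · exact hM (k + 1) hM'
        · exact pvDistinct grid rows cols hR hC s hs L hmin j (k + 1) (by omega) (by omega)
            hje.symm
      rw [if_neg hcond]
      obtain ⟨W', hrun, hinv⟩ := ih (k + 1) _ res (by omega) (by omega) hW1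
      refine ⟨W', ?_, hinv⟩
      rw [show ((k : Int) + 1) + 1 = ((k + 1 : Nat) : Int) + 1 by push_cast; ring]
      exact hrun

-- B's walk from iterate k finds the first iterate not lexicographically above the start
theorem pvB_walk (grid : List String) (rows cols : Int) (hR : 0 < rows) (hC : 0 < cols)
    (s : Int × Int × Int) (hs : pvValid rows cols s) :
    ∀ (fuel k : Nat), 1 ≤ k →
      (∃ m, k ≤ m ∧ m ≤ k + fuel ∧ pvLexLt s (pvIter grid rows cols m s) = false) →
      ∃ m0, solB_walk grid rows cols s fuel (pvIter grid rows cols k s) (k : Int) =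
          (pvIter grid rows cols m0 s, (m0 : Int)) ∧ k ≤ m0 ∧
        pvLexLt s (pvIter grid rows cols m0 s) = false ∧
        ∀ i, k ≤ i → i < m0 → pvLexLt s (pvIter grid rows cols i s) = true := by
  intro fuel
  induction fuel with
  | zero =>
    intro k hk hex
    obtain ⟨m, hm1, hm2, hm3⟩ := hex
    have hmk : m = k := by omega
    subst hmk
    exact ⟨m, rfl, le_refl _, hm3, by omega⟩
  | succ fuel ih =>
    intro k hk hex
    by_cases hb : pvLexLt s (pvIter grid rows cols k s) = true
    · have hstepB : solBnext grid rows cols (pvIter grid rows cols k s).1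
          (pvIter grid rows cols k s).2.1 (pvIter grid rows cols k s).2.2
          = pvIter grid rows cols (k + 1) s := by
        rw [pvStepB_eq grid rows cols hR hC _ (pvIter_valid grid rows cols hR hC k s hs)]
        exact (Function.iterate_succ_apply' (pvStepA grid rows cols) k s).symm
      obtain ⟨m, hm1, hm2, hm3⟩ := hex
      have hmne : m ≠ k := by
        intro he
        rw [he] at hm3
        rw [hm3] at hb
        simp at hb
      obtain ⟨m0, hrun, hge, hm0lex, hmin0⟩ :=
        ih (k + 1) (by omega) ⟨m, by omega, by omega, hm3⟩
      refine ⟨m0, ?_, by omega, hm0lex, ?_⟩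
      · rw [solB_walk_succ, if_pos hb, hstepB,
          show (k : Int) + 1 = ((k + 1 : Nat) : Int) by push_cast; ring]
        exact hrun
      · intro i hi1 hi2
        rcases Nat.eq_or_lt_of_le hi1 with hik | hik
        · rw [← hik]; exact hb
        · exact hmin0 i (by omega) hi2
    · have hbf : pvLexLt s (pvIter grid rows cols k s) = false := by
        revert hb
        cases pvLexLt s (pvIter grid rows cols k s) <;> simp
      refine ⟨k, ?_, le_refl _, hbf, by omega⟩
      rw [solB_walk_succ, if_neg hb]

-- the main fold correspondence over the lex-sorted complete enumeration of states
theorem pvFold (grid : List String) (rows cols : Int) (hR : 0 < rows) (hC : 0 < cols)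
    (ts : List (Int × Int × Int))
    (hsort : ts.Pairwise (fun a b => pvLexLt a b = true))
    (hcompl : ∀ t, pvValid rows cols t → t ∈ ts)
    (hvalid : ∀ t ∈ ts, pvValid rows cols t) :
    ∀ (rest done : List (Int × Int × Int)) (W : PySem.Dict (Int × Int × Int) Bool)
      (res : List Int), done ++ rest = ts →
      (∀ t, W.getD t false = true ↔ ∃ p ∈ done, ∃ i, t = pvIter grid rows cols i p) →
      (rest.foldl (fun st t =>
          if st.1.getD t false then st
          else solA_walk grid rows cols ((rows * cols * 4).toNat + 1) st.1 st.2 t.1 t.2.1 t.2.2 1)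
        (W, res)).2 =
      rest.foldl (fun res t =>
          let p := solB_walk grid rows cols t ((rows * cols * 4).toNat + 1)
                     (solBnext grid rows cols t.1 t.2.1 t.2.2) 1
          if p.1 = t then res ++ [p.2] else res) res := by
  intro rest
  induction rest with
  | nil => intro done W res hsplit hW; rfl
  | cons t0 rest ih =>
    intro done W res hsplit hW
    have hvt : pvValid rows cols t0 := hvalid t0 (by
      rw [← hsplit]; exact List.mem_append_right _ List.mem_cons_self)
    obtain ⟨L, hL0, hLN, hLs, hmin⟩ := pvPeriod_exists grid rows cols hR hC t0 hvt
    have hs2 := hsort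
    rw [← hsplit, List.pairwise_append] at hs2
    have hdone_lt : ∀ p ∈ done, pvLexLt p t0 = true := fun p hp =>
      hs2.2.2 p hp t0 List.mem_cons_self
    have hdone_mem : ∀ p, pvValid rows cols p → pvLexLt p t0 = true → p ∈ done := by
      intro p hpv hpl
      have hpts : p ∈ ts := hcompl p hpv
      rw [← hsplit] at hpts
      rcases List.mem_append.mp hpts with h | h
      · exact h
      · rcases List.mem_cons.mp h with rfl | h2
        · rw [pvLexLt_irrefl] at hpl; simp at hpl
        · have h3 := (List.pairwise_cons.mp hs2.2.1).1 p h2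
          rw [pvLexLt_asymm t0 p h3] at hpl; simp at hpl
    -- B's walk from t0
    have hstate : solBnext grid rows cols t0.1 t0.2.1 t0.2.2 = pvIter grid rows cols 1 t0 := by
      rw [pvStepB_eq grid rows cols hR hC t0 hvt, pvIter, Function.iterate_one]
    obtain ⟨m0, hrunB, hge, hm0lex, hmin0⟩ :=
      pvB_walk grid rows cols hR hC t0 hvt ((rows * cols * 4).toNat + 1) 1 (le_refl 1)
        ⟨L, hL0, by omega, by rw [hLs, pvLexLt_irrefl]⟩
    rw [show ((1 : Nat) : Int) = 1 by norm_num] at hrunB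
    rw [List.foldl_cons, List.foldl_cons]
    dsimp only
    rw [hstate, hrunB]
    by_cases hmk : W.getD t0 false = true
    · -- already visited: A skips; B's walk ends below t0, so B does not append
      obtain ⟨p, hpd, i, hpi⟩ := (hW t0).mp hmk
      have hplex : pvLexLt p t0 = true := hdone_lt p hpd
      have hpne : p ≠ t0 := by
        intro he; rw [he, pvLexLt_irrefl] at hplex; simp at hplex
      have hpv : pvValid rows cols p := hvalid p (by
        rw [← hsplit]; exact List.mem_append_left _ hpd)
      obtain ⟨j, hj⟩ := pvOrbit_symm grid rows cols hR hC p t0 hpv i hpi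
      rw [pvIter_mod grid rows cols t0 L hL0 hLs j] at hj
      have hjL : j % L < L := Nat.mod_lt _ hL0
      have hjpos : 0 < j % L := by
        rcases Nat.eq_zero_or_pos (j % L) with h0 | h0
        · exfalso; rw [h0] at hj; exact hpne hj
        · exact h0
      have hnotmin : pvLexLt t0 (pvIter grid rows cols (j % L) t0) = false := by
        rw [← hj]; exact pvLexLt_asymm p t0 hplex
      -- hence iter m0 t0 ≠ t0
      have hne0 : pvIter grid rows cols m0 t0 ≠ t0 := by
        intro heq
        -- then m0 = L and every 1 ≤ i < L has lex true, contradicting hnotmin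
        have hm0L : m0 = L := by
          rcases Nat.lt_trichotomy m0 L with h | h | h
          · exact absurd heq (by
              intro he
              exact hmin m0 (by omega) h he)
          · exact h
          · have := hmin0 L (by omega) h
            rw [hLs, pvLexLt_irrefl] at this
            simp at this
        have := hmin0 (j % L) (by omega) (by omega)
        rw [hnotmin] at this
        simp at this
      rw [if_pos hmk, if_neg hne0]
      apply ih (done ++ [t0]) W res (by rw [← hsplit, List.append_assoc]; rfl)
      intro t
      rw [hW t]
      constructor
      · rintro ⟨q, hq, iq, hiq⟩
        exact ⟨q, List.mem_append_left _ hq, iq, hiq⟩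
      · rintro ⟨q, hq, iq, hiq⟩
        rcases List.mem_append.mp hq with hq1 | hq1
        · exact ⟨q, hq1, iq, hiq⟩
        · rcases List.mem_cons.mp hq1 with rfl | hq2
          · -- t = iter iq t0, t0 = iter i p: compose
            refine ⟨p, hpd, iq + i, ?_⟩
            rw [hiq, hpi, pvIter, pvIter, pvIter, Function.iterate_add_apply]
          · exact absurd hq2 (List.not_mem_nil)
    · -- fresh cycle: A walks it and appends L; B appends L at its minimum t0
      have hisMin : ∀ i, 1 ≤ i → i < L → pvLexLt t0 (pvIter grid rows cols i t0) = true := by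
        intro i hi1 hi2
        by_contra hno
        have hne : pvIter grid rows cols i t0 ≠ t0 :=
          fun he => pvDistinct grid rows cols hR hC t0 hvt L hmin 0 i (by omega) hi2 he.symm
        rcases pvLexLt_total t0 (pvIter grid rows cols i t0) (fun he => hne he.symm) with h | h
        · exact hno h
        · -- iter i t0 is lex-below t0, valid, hence in done, hence t0 marked
          have hvi := pvIter_valid grid rows cols hR hC i t0 hvt
          have hmem := hdone_mem _ hvi h
          obtain ⟨b, hb⟩ := pvOrbit_symm grid rows cols hR hC t0 (pvIter grid rows cols i t0)
            hvt i rfl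
          exact hmk ((hW t0).mpr ⟨_, hmem, b, hb⟩)
      have hm0L : m0 = L := by
        rcases Nat.lt_trichotomy m0 L with h | h | h
        · exact absurd hm0lex (by rw [hisMin m0 (by omega) h]; simp)
        · exact h
        · have := hmin0 L (by omega) h
          rw [hLs, pvLexLt_irrefl] at this
          simp at this
      have happend : pvIter grid rows cols m0 t0 = t0 := by rw [hm0L, hLs]
      -- A's walk over the fresh cycle
      obtain ⟨W', hrunA, hinv⟩ := pvA_walk grid rows cols hR hC t0 hvt L hL0 hLs hmin
        (fun t => ∃ p ∈ done, ∃ i, t = pvIter grid rows cols i p)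
        (by
          rintro i ⟨p, hpd, j, hj⟩
          apply hmk
          obtain ⟨b, hb⟩ := pvOrbit_symm grid rows cols hR hC t0 (pvIter grid rows cols i t0)
            hvt i rfl
          refine (hW t0).mpr ⟨p, hpd, b + j, ?_⟩
          rw [hb, hj, pvIter, pvIter, pvIter, Function.iterate_add_apply])
        ((rows * cols * 4).toNat + 1) 0 W res hL0 (by omega)
        (by
          intro t
          rw [hW t]
          constructor
          · exact fun h => Or.inl h
          · rintro (h | ⟨j, hj, _⟩)
            · exact h
            · omega)
      rw [show pvIter grid rows cols 0 t0 = t0 from rfl] at hrunA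
      rw [show ((0 : Nat) : Int) + 1 = 1 by norm_num] at hrunA
      rw [if_neg hmk, if_pos happend, hrunA]
      have hm0cast : (m0 : Int) = (L : Int) := by exact_mod_cast congrArg Nat.cast hm0L
      rw [hm0cast]
      apply ih (done ++ [t0]) W' (res ++ [(L : Int)])
        (by rw [← hsplit, List.append_assoc]; rfl)
      intro t
      rw [hinv t]
      constructor
      · rintro (⟨q, hq, iq, hiq⟩ | ⟨j, hj, hje⟩)
        · exact ⟨q, List.mem_append_left _ hq, iq, hiq⟩
        · exact ⟨t0, List.mem_append_right _ List.mem_cons_self, j, hje⟩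
      · rintro ⟨q, hq, iq, hiq⟩
        rcases List.mem_append.mp hq with hq1 | hq1
        · exact Or.inl ⟨q, hq1, iq, hiq⟩
        · rcases List.mem_cons.mp hq1 with rfl | hq2
          · refine Or.inr ⟨iq % L, Nat.mod_lt _ hL0, ?_⟩
            rw [hiq, pvIter_mod grid rows cols q L hL0 hLs iq]
          · exact absurd hq2 (List.not_mem_nil)

theorem pvInit_false (l : List (Int × Int × Int)) (d : PySem.Dict (Int × Int × Int) Bool)
    (hd : ∀ k, d.getD k false = false) (k : Int × Int × Int) :
    (l.foldl (fun d k => d.insert k false) d).getD k false = false := by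
  induction l generalizing d with
  | nil => exact hd k
  | cons a l ih =>
    refine ih _ ?_
    intro k'
    rw [PySem.Dict.getD_insert]
    split <;> [rfl; exact hd k']

theorem pvFoldl_flatMap {α β γ : Type} (g : β → α → β) (f : γ → List α) (l : List γ) (init : β) :
    (l.flatMap f).foldl g init = l.foldl (fun acc i => (f i).foldl g acc) init := by
  induction l generalizing init with
  | nil => rfl
  | cons a l ih => simp [List.flatMap_cons, List.foldl_append, ih]

def pvTriples (rows cols : Int) : List (Int × Int × Int) :=
  (PySem.List.pyRange 0 rows).flatMap (fun i =>
    (PySem.List.pyRange 0 cols).flatMap (fun j =>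
      (PySem.List.pyRange 0 4).map (fun di => (i, j, di))))

theorem pvTriples_valid (rows cols : Int) (t : Int × Int × Int)
    (h : t ∈ pvTriples rows cols) : pvValid rows cols t := by
  simp only [pvTriples, List.mem_flatMap, List.mem_map] at h
  obtain ⟨i, hi, j, hj, d, hd, rfl⟩ := h
  rw [PySem.List.mem_pyRange_one] at hi hj hd
  exact ⟨hi.1, hi.2, hj.1, hj.2, hd.1, hd.2⟩

theorem pvTriples_complete (rows cols : Int) (t : Int × Int × Int)
    (h : pvValid rows cols t) : t ∈ pvTriples rows cols := by
  obtain ⟨x, y, d⟩ := t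
  obtain ⟨h1, h2, h3, h4, h5, h6⟩ := h
  simp only [pvTriples, List.mem_flatMap, List.mem_map]
  exact ⟨x, by rw [PySem.List.mem_pyRange_one]; exact ⟨h1, h2⟩,
    y, by rw [PySem.List.mem_pyRange_one]; exact ⟨h3, h4⟩,
    d, by rw [PySem.List.mem_pyRange_one]; exact ⟨h5, h6⟩, rfl⟩

theorem pvRange_pairwise (n : Nat) : (PySem.List.pyRange 0 (n : Int)).Pairwise (· < ·) := by
  rw [PySem.List.pyRange_zero_nat]
  exact List.Pairwise.map _ (fun a b h => by exact_mod_cast h) List.pairwise_lt_range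

theorem pvTriples_sorted (r c : Nat) :
    (pvTriples (r : Int) (c : Int)).Pairwise (fun a b => pvLexLt a b = true) := by
  rw [pvTriples, List.pairwise_flatMap]
  constructor
  · intro i _
    rw [List.pairwise_flatMap]
    constructor
    · intro j _
      rw [List.pairwise_map]
      exact (pvRange_pairwise 4).imp (fun {a b} h => by
        rw [pvLexLt_iff]; right; exact ⟨rfl, Or.inr ⟨rfl, h⟩⟩)
    · refine (pvRange_pairwise c).imp (fun {j j'} h => ?_)
      intro x hx y hy
      simp only [List.mem_map] at hx hy
      obtain ⟨d, _, rfl⟩ := hx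
      obtain ⟨d', _, rfl⟩ := hy
      rw [pvLexLt_iff]
      right; exact ⟨rfl, Or.inl h⟩
  · refine (pvRange_pairwise r).imp (fun {i i'} h => ?_)
    intro x hx y hy
    simp only [List.mem_flatMap, List.mem_map] at hx hy
    obtain ⟨j, _, d, _, rfl⟩ := hx
    obtain ⟨j', _, d', _, rfl⟩ := hy
    rw [pvLexLt_iff]
    left; exact h

theorem pvMain (grid : List String) (hpre : grid ≠ []) :
    solution grid = solution_alt grid := by
  match grid with
  | [] => exact absurd rfl hpre
  | g0 :: rest =>
  simp only [solution, solution_alt, PySem.List.len_eq, PySem.List.pyGetD_zero_cons,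
    PySem.Str.len_eq]
  apply congrArg (fun l => PySem.List.sorted l (fun x : Int => x) false)
  by_cases hc : g0.toList.length = 0
  · rw [hc]
    norm_num [PySem.List.pyRange_one_eq_nil]
  · set r : Nat := (g0 :: rest).length with hr
    set c : Nat := g0.toList.length with hcc
    have hR : (0:Int) < (r:Int) := by simp [hr]
    have hC : (0:Int) < (c:Int) := by exact_mod_cast Nat.pos_of_ne_zero hc
    set dict0 : PySem.Dict (Int × Int × Int) Bool :=
      (pvTriples (r:Int) (c:Int)).foldl (fun d k => d.insert k false) PySem.Dict.empty
      with hdict0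
    have hinv : ∀ t, dict0.getD t false = true ↔
        ∃ p ∈ ([] : List (Int × Int × Int)), ∃ i, t = pvIter (g0 :: rest) (r:Int) (c:Int) i p := by
      intro t
      rw [hdict0, pvInit_false _ PySem.Dict.empty
        (fun k => by simp [PySem.Dict.getD, PySem.Dict.empty, PySem.Dict.get?]) t]
      simp
    have key := pvFold (g0 :: rest) (r:Int) (c:Int) hR hC (pvTriples (r:Int) (c:Int))
      (pvTriples_sorted r c) (fun t ht => pvTriples_complete _ _ t ht)
      (fun t ht => pvTriples_valid _ _ t ht)
      (pvTriples (r:Int) (c:Int)) [] dict0 [] (by simp) hinv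
    rw [pvTriples] at key
    simp only [pvFoldl_flatMap, List.foldl_map] at key
    exact key

-- ===== VERDICT (by name: the statement is the Claim_ definition above) =====
theorem solution_spec : Claim_equal_solution := by
  intro grid _ hpre
  exact pvMain grid hpre.1
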